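-- pv_equiv track=rewrite | github.com/ASLawan/Automate-Boring-Stuff | lists/second_list.py | check_streak
-- ===== SOURCE A (Python) =====
-- def check_streak(outcomes):
--     heads = 0
--     tails = 0
--     streak_6 = 0
--
--     for outcome in outcomes:
--         if outcome == 'H':
--             heads += 1
--             tails = 0
--         else:
--             tails += 1
--             heads = 0
--
--         if heads == 6 or tails == 6:
--             streak_6 += 1
--
--     return streak_6
-- ===== SOURCE B (Python) =====
-- from itertools import groupby
--
-- def check_streak(outcomes):
--     return sum(1 for _, run in groupby(outcomes, key=lambda o: o == 'H')
--                if sum(1 for _ in run) >= 6)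
-- ===== Notes on version B (the rewrite author's own statement) =====
-- stated objective: simpler
-- what changed: Replaces the two running heads/tails counters and the '== 6' test with a run-length decomposition: groupby on the predicate (o == 'H') and count the maximal runs of length >= 6.
import Mathlib
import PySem

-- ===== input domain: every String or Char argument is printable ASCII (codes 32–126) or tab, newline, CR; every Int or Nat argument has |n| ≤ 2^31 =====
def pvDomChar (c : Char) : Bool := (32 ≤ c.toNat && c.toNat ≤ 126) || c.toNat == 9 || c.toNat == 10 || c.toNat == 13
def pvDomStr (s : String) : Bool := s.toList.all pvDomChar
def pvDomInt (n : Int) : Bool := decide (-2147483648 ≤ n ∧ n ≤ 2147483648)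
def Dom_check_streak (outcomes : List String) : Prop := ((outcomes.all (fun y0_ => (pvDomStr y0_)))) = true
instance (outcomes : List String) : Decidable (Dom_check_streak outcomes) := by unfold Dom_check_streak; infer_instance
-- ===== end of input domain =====

-- B replaces A's two running heads/tails counters with a run-length decomposition
-- (groupby on the predicate o == 'H', count maximal runs of length ≥ 6): simpler, same cost.

-- ===== PORT A =====
-- literal transliteration of A's loop: state (heads, tails, streak_6)
def check_streak_go : List String → Int → Int → Int → Int
  | [], _heads, _tails, streak_6 => streak_6
  | outcome :: rest, heads, tails, streak_6 =>
    let heads' := if outcome == "H" then heads + 1 else 0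
    let tails' := if outcome == "H" then 0 else tails + 1
    let streak' := if heads' = 6 ∨ tails' = 6 then streak_6 + 1 else streak_6
    check_streak_go rest heads' tails' streak'

def check_streak (outcomes : List String) : Int :=
  check_streak_go outcomes 0 0 0

-- ===== PORT B =====
-- port of itertools.groupby(outcomes, key=lambda o: o == 'H') as run lengths:
-- each maximal block of equal key becomes its length
def check_streak_runs : List String → List Nat
  | [] => []
  | o :: rest =>
    ((rest.takeWhile (fun x => (x == "H") == (o == "H"))).length + 1)
      :: check_streak_runs (rest.dropWhile (fun x => (x == "H") == (o == "H")))
termination_by xs => xs.length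
decreasing_by
  exact Nat.lt_succ_of_le (List.length_dropWhile_le ..)

def check_streak_alt (outcomes : List String) : Int :=
  ((check_streak_runs outcomes).countP (fun n => decide (6 ≤ n)) : Int)

-- ===== PRECONDITION & SPEC =====
def Spec_check_streak (outcomes : List String) (out : Int) : Prop := out = check_streak_alt outcomes
instance (outcomes : List String) (out : Int) : Decidable (Spec_check_streak outcomes out) := by unfold Spec_check_streak; infer_instance

-- ===== CLAIM (what is proved, stated in full; the proofs are below) =====
def Claim_equal_check_streak : Prop := ∀ (outcomes : List String), Dom_check_streak outcomes → Spec_check_streak outcomes (check_streak outcomes)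

-- ===== LEMMAS AND PROOFS =====

-- head of a dropWhile fails the predicate
theorem pv_head?_dropWhile {α : Type} (p : α → Bool) :
    ∀ (l : List α) (x : α), (l.dropWhile p).head? = some x → p x = false := by
  intro l
  induction l with
  | nil => intro x h; simp [List.dropWhile] at h
  | cons a l ih =>
      intro x h
      by_cases hp : p a = true
      · rw [List.dropWhile_cons_of_pos hp] at h; exact ih x h
      · rw [List.dropWhile_cons_of_neg hp] at h
        simp at h
        subst h
        simpa using hp

-- one step of A's loop on a heads outcome
theorem pv_stepH (o : String) (ho : (o == "H") = true) (rest : List String) (h t s : Int) :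
    check_streak_go (o :: rest) h t s
      = check_streak_go rest (h + 1) 0 (if h + 1 = 6 ∨ (0:Int) = 6 then s + 1 else s) := by
  simp [check_streak_go, ho]

-- one step of A's loop on a non-heads outcome
theorem pv_stepT (o : String) (ho : (o == "H") = false) (rest : List String) (h t s : Int) :
    check_streak_go (o :: rest) h t s
      = check_streak_go rest 0 (t + 1) (if (0:Int) = 6 ∨ t + 1 = 6 then s + 1 else s) := by
  simp [check_streak_go, ho]

-- A's loop over a block of heads with the heads counter at h adds 1 to the
-- streak iff the counter crosses 6 inside the block
theorem pv_runH : ∀ (ys zs : List String) (h s : Int),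
    (∀ y ∈ ys, (y == "H") = true) →
    check_streak_go (ys ++ zs) h 0 s
      = check_streak_go zs (h + ys.length) 0
          (s + if h < 6 ∧ 6 ≤ h + (ys.length : Int) then 1 else 0) := by
  intro ys
  induction ys with
  | nil =>
      intro zs h s _
      simp only [List.nil_append, List.length_nil, Nat.cast_zero, add_zero]
      rw [if_neg (by omega : ¬ (h < 6 ∧ 6 ≤ h)), add_zero]
  | cons y yr ih =>
      intro zs h s hy
      rw [List.cons_append, pv_stepH y (hy y (List.mem_cons_self ..)) _ h 0 s]
      rw [ih zs (h + 1) _ (fun y' hm => hy y' (List.mem_cons_of_mem _ hm))]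
      congr 1
      · simp only [List.length_cons]; push_cast; ring
      · simp only [List.length_cons]; push_cast
        simp only [or_false]
        split_ifs <;> omega

-- the symmetric block lemma for tails
theorem pv_runT : ∀ (ys zs : List String) (h s : Int),
    (∀ y ∈ ys, (y == "H") = false) →
    check_streak_go (ys ++ zs) 0 h s
      = check_streak_go zs 0 (h + ys.length)
          (s + if h < 6 ∧ 6 ≤ h + (ys.length : Int) then 1 else 0) := by
  intro ys
  induction ys with
  | nil =>
      intro zs h s _
      simp only [List.nil_append, List.length_nil, Nat.cast_zero, add_zero]
      rw [if_neg (by omega : ¬ (h < 6 ∧ 6 ≤ h)), add_zero]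
  | cons y yr ih =>
      intro zs h s hy
      rw [List.cons_append, pv_stepT y (hy y (List.mem_cons_self ..)) _ 0 h s]
      rw [ih zs (h + 1) _ (fun y' hm => hy y' (List.mem_cons_of_mem _ hm))]
      congr 1
      · simp only [List.length_cons]; push_cast; ring
      · simp only [List.length_cons]; push_cast
        simp only [false_or]
        split_ifs <;> omega

-- at a run boundary the accumulated counter is irrelevant: it is reset anyway
theorem pv_resetH (zs : List String) (h s : Int)
    (hz : ∀ z, zs.head? = some z → (z == "H") = false) :
    check_streak_go zs h 0 s = check_streak_go zs 0 0 s := by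
  cases zs with
  | nil => rfl
  | cons z zr => simp [check_streak_go, hz z rfl]

theorem pv_resetT (zs : List String) (h s : Int)
    (hz : ∀ z, zs.head? = some z → (z == "H") = true) :
    check_streak_go zs 0 h s = check_streak_go zs 0 0 s := by
  cases zs with
  | nil => rfl
  | cons z zr => simp [check_streak_go, hz z rfl]

-- main invariant: A's loop from the fresh state computes s plus B's run count
theorem pv_main : ∀ (n : Nat) (xs : List String), xs.length ≤ n → ∀ (s : Int),
    check_streak_go xs 0 0 s
      = s + ((check_streak_runs xs).countP (fun m => decide (6 ≤ m)) : Int) := by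
  intro n
  induction n with
  | zero =>
      intro xs hlen s
      have : xs = [] := List.eq_nil_of_length_eq_zero (Nat.le_zero.mp hlen)
      subst this
      simp [check_streak_go, check_streak_runs]
  | succ n ih =>
      intro xs hlen s
      cases xs with
      | nil => simp [check_streak_go, check_streak_runs]
      | cons o rest =>
          have hsplit : rest.takeWhile (fun x => (x == "H") == (o == "H"))
              ++ rest.dropWhile (fun x => (x == "H") == (o == "H")) = rest :=
            List.takeWhile_append_dropWhile
          have hruns : check_streak_runs (o :: rest)
              = ((rest.takeWhile (fun x => (x == "H") == (o == "H"))).length + 1)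
                :: check_streak_runs (rest.dropWhile (fun x => (x == "H") == (o == "H"))) := by
            rw [check_streak_runs]
          have hyall : ∀ y ∈ rest.takeWhile (fun x => (x == "H") == (o == "H")),
              (y == "H") = (o == "H") := by
            intro y hm
            have := List.mem_takeWhile_imp hm
            simpa using this
          have hzhead : ∀ z,
              (rest.dropWhile (fun x => (x == "H") == (o == "H"))).head? = some z →
              ((z == "H") == (o == "H")) = false := fun z hz =>
            pv_head?_dropWhile _ rest z hz
          have hzlen : (rest.dropWhile (fun x => (x == "H") == (o == "H"))).length ≤ n := by
            have h1 := List.length_dropWhile_le (p := fun x => (x == "H") == (o == "H")) (l := rest)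
            have h2 : rest.length ≤ n := by simpa using Nat.lt_succ_iff.mp (by simpa using hlen)
            omega
          rw [hruns, List.countP_cons]
          rcases Bool.eq_false_or_eq_true (o == "H") with hb | hb
          ·
              rw [pv_stepH o hb rest 0 0 s,
                  if_neg (by norm_num : ¬ ((0:Int) + 1 = 6 ∨ (0:Int) = 6))]
              have hgo : check_streak_go rest ((0:Int)+1) 0 s
                  = check_streak_go (rest.takeWhile (fun x => (x == "H") == (o == "H"))
                      ++ rest.dropWhile (fun x => (x == "H") == (o == "H"))) 1 0 s := by
                rw [hsplit]; norm_num
              rw [hgo, pv_runH _ _ 1 s (by intro y hm; rw [hyall y hm, hb]),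
                  pv_resetH _ _ _ (by intro z hz; have := hzhead z hz; rw [hb] at this; simpa using this),
                  ih _ hzlen]
              simp only [decide_eq_true_eq]
              split_ifs <;> omega
          ·
              rw [pv_stepT o hb rest 0 0 s,
                  if_neg (by norm_num : ¬ ((0:Int) = 6 ∨ (0:Int) + 1 = 6))]
              have hgo : check_streak_go rest 0 ((0:Int)+1) s
                  = check_streak_go (rest.takeWhile (fun x => (x == "H") == (o == "H"))
                      ++ rest.dropWhile (fun x => (x == "H") == (o == "H"))) 0 1 s := by
                rw [hsplit]; norm_num
              rw [hgo, pv_runT _ _ 1 s (by intro y hm; rw [hyall y hm, hb]),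
                  pv_resetT _ _ _ (by intro z hz; have := hzhead z hz; rw [hb] at this; simpa using this),
                  ih _ hzlen]
              simp only [decide_eq_true_eq]
              split_ifs <;> omega
-- ===== VERDICT (by name: the statement is the Claim_ definition above) =====
theorem check_streak_spec : Claim_equal_check_streak := by
  intro outcomes _
  unfold Spec_check_streak check_streak check_streak_alt
  rw [pv_main outcomes.length outcomes (le_refl _) 0]
  simp
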